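-- pv_equiv track=rewrite | github.com/KyleKeane/space-time-termonal | asat/interactive.py | _contiguous_non_empty_groups
-- ===== SOURCE A (Python) =====
-- from typing import Optional
--
-- def _contiguous_non_empty_groups(
--     text_rows: tuple[str, ...],
-- ) -> list[tuple[int, int]]:
--     """Return (start, end) index pairs for runs of non-empty rows."""
--     groups: list[tuple[int, int]] = []
--     start: Optional[int] = None
--     for index, row in enumerate(text_rows):
--         if row.strip():
--             if start is None:
--                 start = index
--         else:
--             if start is not None:
--                 groups.append((start, index - 1))
--                 start = None
--     if start is not None:
--         groups.append((start, len(text_rows) - 1))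
--     return groups
-- ===== SOURCE B (Python) =====
-- def _contiguous_non_empty_groups(text_rows):
--     """Return (start, end) index pairs for runs of non-empty rows."""
--     flags = [bool(row.strip()) for row in text_rows]
--     starts = [i for i, (f, prev) in enumerate(zip(flags, [False] + flags)) if f and not prev]
--     ends = [i for i, (f, nxt) in enumerate(zip(flags, flags[1:] + [False])) if f and not nxt]
--     return list(zip(starts, ends))
-- ===== Notes on version B (the rewrite author's own statement) =====
-- stated objective: alternative
-- what changed: Replaces A's one-pass start-sentinel state machine by boundary detection: a flags vector, then run-starts and run-ends found by comparing each flag with its shifted neighbor ([False]+flags / flags[1:]+[False]), zipped together.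
import Mathlib
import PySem

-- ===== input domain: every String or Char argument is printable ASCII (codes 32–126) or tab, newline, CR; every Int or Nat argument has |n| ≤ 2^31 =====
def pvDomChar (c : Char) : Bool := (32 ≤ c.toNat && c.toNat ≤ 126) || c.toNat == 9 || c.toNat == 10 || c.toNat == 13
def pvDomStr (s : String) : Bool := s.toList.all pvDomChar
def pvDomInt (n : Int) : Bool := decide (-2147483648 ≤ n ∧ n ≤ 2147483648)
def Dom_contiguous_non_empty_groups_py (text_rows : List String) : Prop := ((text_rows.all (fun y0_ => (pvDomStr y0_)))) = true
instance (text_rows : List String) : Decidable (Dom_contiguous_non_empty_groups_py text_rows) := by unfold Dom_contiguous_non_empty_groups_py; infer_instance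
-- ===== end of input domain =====

-- B replaces A's start-sentinel state machine by boundary detection: a flags vector,
-- run-starts/run-ends found by comparing each flag with its shifted neighbor, then zipped (alternative).

-- truthiness of row.strip(): nonempty after stripping
def pvNonblank (row : String) : Bool := PySem.Str.strip row != ""

-- ===== PORT A =====
-- the for-loop over enumerate(text_rows), carrying (groups, start)
def pvALoop : List (Int × String) → List (Int × Int) → Option Int → (List (Int × Int) × Option Int)
  | [], groups, start => (groups, start)
  | (index, row) :: rest, groups, start =>
    if pvNonblank row then
      match start with
      | none => pvALoop rest groups (some index)
      | some _ => pvALoop rest groups start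
    else
      match start with
      | some st => pvALoop rest (groups ++ [(st, index - 1)]) none
      | none => pvALoop rest groups none

def contiguous_non_empty_groups_py (text_rows : List String) : List (Int × Int) :=
  match pvALoop (PySem.List.enumerate text_rows) [] none with
  | (groups, some st) => groups ++ [(st, (text_rows.length : Int) - 1)]
  | (groups, none) => groups

-- ===== PORT B =====
-- flags = [bool(r.strip()) for r in rows]; starts/ends via enumerate(zip(flags, shifted)); zip them
def contiguous_non_empty_groups_py_alt (text_rows : List String) : List (Int × Int) :=
  let flags := text_rows.map pvNonblank
  let starts := (PySem.List.enumerate (flags.zip (false :: flags))).filterMap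
      (fun p => if p.2.1 && !p.2.2 then some p.1 else none)
  let ends := (PySem.List.enumerate (flags.zip (flags.drop 1 ++ [false]))).filterMap
      (fun p => if p.2.1 && !p.2.2 then some p.1 else none)
  starts.zip ends

-- ===== PRECONDITION & SPEC =====
def Spec_contiguous_non_empty_groups_py (text_rows : List String) (out : List (Int × Int)) : Prop := out = contiguous_non_empty_groups_py_alt text_rows
instance (text_rows : List String) (out : List (Int × Int)) : Decidable (Spec_contiguous_non_empty_groups_py text_rows out) := by unfold Spec_contiguous_non_empty_groups_py; infer_instance

-- ===== CLAIM (what is proved, stated in full; the proofs are below) =====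
def Claim_equal_contiguous_non_empty_groups_py : Prop := ∀ (text_rows : List String), Dom_contiguous_non_empty_groups_py text_rows → Spec_contiguous_non_empty_groups_py text_rows (contiguous_non_empty_groups_py text_rows)

-- ===== LEMMAS AND PROOFS =====

-- finish A's loop result with the flush index
def pvAFin (p : List (Int × Int) × Option Int) (fin : Int) : List (Int × Int) :=
  match p.2 with
  | none => p.1
  | some st => p.1 ++ [(st, fin)]

-- starts of runs in flags beginning at index i, given the flag p at index i-1
def pvS : Bool → Int → List Bool → List Int
  | _, _, [] => []
  | p, i, f :: fs => (if f && !p then [i] else []) ++ pvS f (i + 1) fs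

-- ends of runs (including a possible end at i-1), given the flag p at index i-1
def pvF : Bool → Int → List Bool → List Int
  | p, i, [] => if p then [i - 1] else []
  | p, i, f :: fs => (if p && !f then [i - 1] else []) ++ pvF f (i + 1) fs

-- ends via the NEXT flag (what B computes)
def pvE : Int → List Bool → List Int
  | _, [] => []
  | i, f :: fs => (if f && !(fs.headD false) then [i] else []) ++ pvE (i + 1) fs

theorem enumerate_cons' {α : Type} (i : Int) (r : α) (rs : List α) :
    PySem.List.enumerate (r :: rs) i = (i, r) :: PySem.List.enumerate rs (i + 1) :=
  PySem.List.enumerate_cons ..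

-- main invariant: A's loop from state none / some st yields zipped starts/ends
theorem pvMain (fs : List Bool) : ∀ (i : Int) (rs : List String) (acc : List (Int × Int)),
    rs.map pvNonblank = fs →
    (pvAFin (pvALoop (PySem.List.enumerate rs i) acc none) (i + fs.length - 1)
        = acc ++ (pvS false i fs).zip (pvF false i fs))
  ∧ (∀ st : Int, pvAFin (pvALoop (PySem.List.enumerate rs i) acc (some st)) (i + fs.length - 1)
        = acc ++ (st :: pvS true i fs).zip (pvF true i fs)) := by
  induction fs with
  | nil =>
    intro i rs acc h
    have : rs = [] := by cases rs <;> simp_all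
    subst this
    refine ⟨by simp [PySem.List.enumerate_nil, pvALoop, pvAFin, pvS, pvF], fun st => ?_⟩
    simp [PySem.List.enumerate_nil, pvALoop, pvAFin, pvS, pvF]
  | cons f fs ih =>
    intro i rs acc h
    obtain ⟨r, rs', rfl⟩ : ∃ r rs', rs = r :: rs' := by
      cases rs with
      | nil => simp at h
      | cons a b => exact ⟨a, b, rfl⟩
    simp only [List.map_cons, List.cons.injEq] at h
    obtain ⟨hf, hfs⟩ := h
    have hlen : ∀ j : Int, j + 1 + ((fs.length : Int)) - 1 = j + (((f :: fs).length : Int)) - 1 := by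
      intro j; simp only [List.length_cons]; push_cast; ring
    have ihN := fun acc' => (ih (i + 1) rs' acc' hfs).1
    have ihP := fun acc' => (ih (i + 1) rs' acc' hfs).2
    constructor
    · rw [enumerate_cons']
      cases f with
      | true =>
        rw [show pvALoop ((i, r) :: PySem.List.enumerate rs' (i + 1)) acc none
            = pvALoop (PySem.List.enumerate rs' (i + 1)) acc (some i) from by
              simp [pvALoop, hf]]
        have h2 := ihP acc i
        rw [hlen i] at h2
        rw [h2]
        simp [pvS, pvF]
      | false =>
        rw [show pvALoop ((i, r) :: PySem.List.enumerate rs' (i + 1)) acc none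
            = pvALoop (PySem.List.enumerate rs' (i + 1)) acc none from by
              simp [pvALoop, hf]]
        have h1 := ihN acc
        rw [hlen i] at h1
        rw [h1]
        simp [pvS, pvF]
    · intro st
      rw [enumerate_cons']
      cases f with
      | true =>
        rw [show pvALoop ((i, r) :: PySem.List.enumerate rs' (i + 1)) acc (some st)
            = pvALoop (PySem.List.enumerate rs' (i + 1)) acc (some st) from by
              simp [pvALoop, hf]]
        have h2 := ihP acc st
        rw [hlen i] at h2
        rw [h2]
        simp [pvS, pvF]
      | false =>
        rw [show pvALoop ((i, r) :: PySem.List.enumerate rs' (i + 1)) acc (some st)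
            = pvALoop (PySem.List.enumerate rs' (i + 1)) (acc ++ [(st, i - 1)]) none from by
              simp [pvALoop, hf]]
        have h1 := ihN (acc ++ [(st, i - 1)])
        rw [hlen i] at h1
        rw [h1]
        simp [pvS, pvF, List.zip]

-- pvF with previous flag false equals the next-flag formulation pvE
theorem pvF_eq_pvE (fs : List Bool) : ∀ (i : Int),
    (pvF false i fs = pvE i fs)
  ∧ (pvF true i fs = if fs.headD false then pvE i fs else (i - 1) :: pvE i fs) := by
  induction fs with
  | nil => intro i; simp [pvF, pvE]
  | cons f fs ih =>
    intro i
    cases f with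
    | true =>
      constructor
      · rw [pvF, pvE]
        have := (ih (i + 1)).2
        cases h : fs.headD false <;> simp_all
      · rw [pvF, pvE]
        have := (ih (i + 1)).2
        cases h : fs.headD false <;> simp_all
    | false =>
      constructor
      · rw [pvF, pvE]
        have := (ih (i + 1)).1
        simp_all
      · rw [pvF, pvE]
        have := (ih (i + 1)).1
        simp_all

-- B's starts-comprehension computes pvS
theorem starts_eq (fs : List Bool) : ∀ (i : Int) (p : Bool),
    (PySem.List.enumerate (fs.zip (p :: fs)) i).filterMap
        (fun q => if q.2.1 && !q.2.2 then some q.1 else none)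
      = pvS p i fs := by
  induction fs with
  | nil => intro i p; simp [PySem.List.enumerate_nil, pvS]
  | cons f fs ih =>
    intro i p
    rw [show (f :: fs).zip (p :: f :: fs) = (f, p) :: fs.zip (f :: fs) from rfl,
      enumerate_cons', List.filterMap_cons, ih (i + 1) f, pvS]
    cases f <;> cases p <;> simp

-- B's ends-comprehension computes pvE
theorem ends_eq (fs : List Bool) : ∀ (i : Int),
    (PySem.List.enumerate (fs.zip (fs.drop 1 ++ [false])) i).filterMap
        (fun q => if q.2.1 && !q.2.2 then some q.1 else none)
      = pvE i fs := by
  induction fs with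
  | nil => intro i; simp [PySem.List.enumerate_nil, pvE]
  | cons f fs ih =>
    intro i
    have hz : (f :: fs).zip (fs ++ [false]) = (f, fs.headD false) :: fs.zip (fs.drop 1 ++ [false]) := by
      cases fs <;> rfl
    rw [List.drop_one, List.tail_cons, hz, enumerate_cons', List.filterMap_cons, ih (i + 1), pvE]
    cases h : f && !(fs.headD false) <;> simp

-- ===== VERDICT (by name: the statement is the Claim_ definition above) =====
theorem contiguous_non_empty_groups_py_spec : Claim_equal_contiguous_non_empty_groups_py := by
  intro rows _
  unfold Spec_contiguous_non_empty_groups_py contiguous_non_empty_groups_py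
    contiguous_non_empty_groups_py_alt
  have h := (pvMain (rows.map pvNonblank) 0 rows [] rfl).1
  have e : (0 : Int) + ((rows.map pvNonblank).length : Int) - 1 = (rows.length : Int) - 1 := by
    simp
  rw [e] at h
  simp only [starts_eq (rows.map pvNonblank) 0 false, ends_eq (rows.map pvNonblank) 0]
  rw [List.nil_append] at h
  rw [← (pvF_eq_pvE (rows.map pvNonblank) 0).1, ← h]
  unfold pvAFin
  rcases pvALoop (PySem.List.enumerate rows 0) [] none with ⟨g, (_ | st)⟩ <;> rfl
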